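-- pv_equiv track=rewrite | github.com/manic-milos/testable_ae | upscaling.py | get_lowres_coords
-- ===== SOURCE A (Python) =====
-- def get_lowres_coords(x,y,lowres_coords,highres_coords,first=True):
-- 	if(x<0 or y<0):
-- 		return [0,-1];
-- 	li=-1;
-- 	for i in range(len(lowres_coords)):
-- 		if(lowres_coords[i][0]==x//2 and lowres_coords[i][1]==y//2):
-- 			li=i;
-- 	if(li>=0):
-- 		return [1,li];
-- 	if(not first):
-- 		return [0,-1];
-- 	h=1;
-- 	if(x%2==0):
-- 		h=-1;
-- 	v=1;
-- 	if(y%2==0):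
-- 		v=-1;
-- 	o,li=get_lowres_coords(x+h,y,lowres_coords,highres_coords,False);
-- 	if(li>=0):
-- 		return [0,li];
-- 	o,li=get_lowres_coords(x,y+v,lowres_coords,highres_coords,False);
-- 	if(li>=0):
-- 		return [0,li];
-- 	o,li=get_lowres_coords(x+v,y+v,lowres_coords,highres_coords,False);
-- 	if(li>=0):
-- 		return [0,li];
-- 	return [0,-1];
-- ===== SOURCE B (Python) =====
-- def get_lowres_coords(x, y, lowres_coords, highres_coords, first=True):
--     if x < 0 or y < 0:
--         return [0, -1]
--     index = {}
--     for i, row in enumerate(lowres_coords):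
--         index[(row[0], row[1])] = i
--     li = index.get((x // 2, y // 2), -1)
--     if li >= 0:
--         return [1, li]
--     if not first:
--         return [0, -1]
--     h = -1 if x % 2 == 0 else 1
--     v = -1 if y % 2 == 0 else 1
--     for cx, cy in ((x + h, y), (x, y + v), (x + v, y + v)):
--         if cx < 0 or cy < 0:
--             continue
--         li = index.get((cx // 2, cy // 2), -1)
--         if li >= 0:
--             return [0, li]
--     return [0, -1]
-- ===== Notes on version B (the rewrite author's own statement) =====
-- stated objective: alternative
-- what changed: B builds a hash index (dict keyed by (row[0],row[1]), last index wins by overwrite) in one pass and replaces every linear scan -- the direct lookup and the three neighbor lookups, which in A are up to four scans via a depth-1 recursion -- by O(1) dictionary lookups.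
-- outside the precondition, e.g. on get_lowres_coords(0, 0, [[5]], [], True): A returns [0, -1], B raises IndexError
import Mathlib
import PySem

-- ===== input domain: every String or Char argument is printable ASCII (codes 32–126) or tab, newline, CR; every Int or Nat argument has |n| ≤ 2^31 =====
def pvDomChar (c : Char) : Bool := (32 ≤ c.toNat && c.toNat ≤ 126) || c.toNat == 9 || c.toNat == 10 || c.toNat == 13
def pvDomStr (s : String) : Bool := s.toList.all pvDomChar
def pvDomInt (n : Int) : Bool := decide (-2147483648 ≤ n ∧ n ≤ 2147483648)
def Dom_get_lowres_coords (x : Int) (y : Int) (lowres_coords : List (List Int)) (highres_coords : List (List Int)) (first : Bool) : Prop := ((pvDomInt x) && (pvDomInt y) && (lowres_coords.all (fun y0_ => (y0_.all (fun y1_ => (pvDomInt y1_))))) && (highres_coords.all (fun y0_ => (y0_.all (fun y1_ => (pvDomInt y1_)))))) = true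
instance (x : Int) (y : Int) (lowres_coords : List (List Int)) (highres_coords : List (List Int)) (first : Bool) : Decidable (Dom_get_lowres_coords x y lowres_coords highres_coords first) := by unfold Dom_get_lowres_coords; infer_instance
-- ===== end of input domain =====

-- B replaces A's repeated linear scans (direct probe plus a depth-1 recursion over three
-- neighbor probes) by one pass building a dict index keyed by (row[0],row[1]) (last index
-- wins by overwrite) followed by O(1) lookups (objective: alternative).


-- ===== PORT A =====
-- the forward last-wins scan 'for i in range(len(lowres_coords)): if lc[i][0]==x//2 and lc[i][1]==y//2: li=i'
-- (row element access uses pyGetD with default 0: exact under Pre_, which guarantees every row has ≥ 2 entries whenever a scan runs)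
def pvAScan (x : Int) (y : Int) (lc : List (List Int)) : Int :=
  (List.range lc.length).foldl (fun (li : Int) (i : Nat) =>
    if PySem.List.pyGetD (PySem.List.pyGetD lc (i : Int) []) 0 0 = PySem.Int.floordiv x 2 ∧
       PySem.List.pyGetD (PySem.List.pyGetD lc (i : Int) []) 1 0 = PySem.Int.floordiv y 2
    then (i : Int) else li) (-1)

-- Python's 'o,li = get_lowres_coords(...)' unpacks the returned 2-list; ported as '.getD 1 0' (the result always has length 2)
def get_lowres_coords (x : Int) (y : Int) (lowres_coords : List (List Int)) (highres_coords : List (List Int)) (first : Bool) : List Int :=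
  if x < 0 ∨ y < 0 then [0, -1]
  else
    let li := pvAScan x y lowres_coords
    if li ≥ 0 then [1, li]
    else if first = false then [0, -1]
    else
      let h : Int := if PySem.Int.mod x 2 = 0 then -1 else 1
      let v : Int := if PySem.Int.mod y 2 = 0 then -1 else 1
      let li1 := (get_lowres_coords (x + h) y lowres_coords highres_coords false).getD 1 0
      if li1 ≥ 0 then [0, li1]
      else
        let li2 := (get_lowres_coords x (y + v) lowres_coords highres_coords false).getD 1 0
        if li2 ≥ 0 then [0, li2]
        else
          let li3 := (get_lowres_coords (x + v) (y + v) lowres_coords highres_coords false).getD 1 0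
          if li3 ≥ 0 then [0, li3] else [0, -1]
termination_by (if first then 1 else 0)
decreasing_by all_goals (simp_all)

-- ===== PORT B =====
-- 'index = {}; for i, row in enumerate(lowres_coords): index[(row[0], row[1])] = i'
def pvBuild (lc : List (List Int)) : PySem.Dict (Int × Int) Int :=
  (PySem.List.enumerate lc).foldl
    (fun d p => d.insert (PySem.List.pyGetD p.2 0 0, PySem.List.pyGetD p.2 1 0) p.1)
    PySem.Dict.empty

-- 'for cx, cy in ...: if cx < 0 or cy < 0: continue; li = index.get(...); if li >= 0: return [0, li]'
def pvTryCands (d : PySem.Dict (Int × Int) Int) : List (Int × Int) → List Int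
  | [] => [0, -1]
  | (cx, cy) :: cs =>
      if cx < 0 ∨ cy < 0 then pvTryCands d cs
      else
        let li := d.getD (PySem.Int.floordiv cx 2, PySem.Int.floordiv cy 2) (-1)
        if li ≥ 0 then [0, li] else pvTryCands d cs

def get_lowres_coords_alt (x : Int) (y : Int) (lowres_coords : List (List Int)) (highres_coords : List (List Int)) (first : Bool) : List Int :=
  if x < 0 ∨ y < 0 then [0, -1]
  else
    let index := pvBuild lowres_coords
    let li := index.getD (PySem.Int.floordiv x 2, PySem.Int.floordiv y 2) (-1)
    if li ≥ 0 then [1, li]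
    else if first = false then [0, -1]
    else
      let h : Int := if PySem.Int.mod x 2 = 0 then -1 else 1
      let v : Int := if PySem.Int.mod y 2 = 0 then -1 else 1
      pvTryCands index [(x + h, y), (x, y + v), (x + v, y + v)]

-- ===== PRECONDITION & SPEC =====
-- Pre_ excludes inputs with x ≥ 0 and y ≥ 0 containing a row of fewer than 2 entries: there B's
-- unconditional row[0]/row[1] access raises IndexError (and A's short-circuit indexing can raise too,
-- though on some such inputs A still returns; see cites).
def Pre_get_lowres_coords (x : Int) (y : Int) (lowres_coords : List (List Int)) (highres_coords : List (List Int)) (first : Bool) : Prop :=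
  (x < 0 ∨ y < 0) ∨ ∀ r ∈ lowres_coords, 2 ≤ r.length
instance (x : Int) (y : Int) (lowres_coords : List (List Int)) (highres_coords : List (List Int)) (first : Bool) : Decidable (Pre_get_lowres_coords x y lowres_coords highres_coords first) := by unfold Pre_get_lowres_coords; infer_instance
def pvWitness_get_lowres_coords : Int × Int × List (List Int) × List (List Int) × Bool := (2, 3, [[0, 0], [1, 1]], [], true)
def Spec_get_lowres_coords (x : Int) (y : Int) (lowres_coords : List (List Int)) (highres_coords : List (List Int)) (first : Bool) (out : List Int) : Prop := out = get_lowres_coords_alt x y lowres_coords highres_coords first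
instance (x : Int) (y : Int) (lowres_coords : List (List Int)) (highres_coords : List (List Int)) (first : Bool) (out : List Int) : Decidable (Spec_get_lowres_coords x y lowres_coords highres_coords first out) := by unfold Spec_get_lowres_coords; infer_instance

-- ===== CLAIM (what is proved, stated in full; the proofs are below) =====
def Claim_equal_get_lowres_coords : Prop := ∀ (x : Int) (y : Int) (lowres_coords : List (List Int)) (highres_coords : List (List Int)) (first : Bool), Dom_get_lowres_coords x y lowres_coords highres_coords first → Pre_get_lowres_coords x y lowres_coords highres_coords first → Spec_get_lowres_coords x y lowres_coords highres_coords first (get_lowres_coords x y lowres_coords highres_coords first)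

-- ===== LEMMAS AND PROOFS =====

-- appending one row to A's scan: last-wins means the appended row decides if it matches
theorem pvAScan_append (x y : Int) (lc : List (List Int)) (r : List Int) :
    pvAScan x y (lc ++ [r]) =
      if PySem.List.pyGetD r 0 0 = PySem.Int.floordiv x 2 ∧
         PySem.List.pyGetD r 1 0 = PySem.Int.floordiv y 2
      then (lc.length : Int) else pvAScan x y lc := by
  unfold pvAScan
  rw [List.length_append, List.length_singleton, List.range_succ, List.foldl_append]
  have hcong :
      (List.range lc.length).foldl (fun (li : Int) (i : Nat) =>
        if PySem.List.pyGetD (PySem.List.pyGetD (lc ++ [r]) (i : Int) []) 0 0 = PySem.Int.floordiv x 2 ∧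
           PySem.List.pyGetD (PySem.List.pyGetD (lc ++ [r]) (i : Int) []) 1 0 = PySem.Int.floordiv y 2
        then (i : Int) else li) (-1)
      =
      (List.range lc.length).foldl (fun (li : Int) (i : Nat) =>
        if PySem.List.pyGetD (PySem.List.pyGetD lc (i : Int) []) 0 0 = PySem.Int.floordiv x 2 ∧
           PySem.List.pyGetD (PySem.List.pyGetD lc (i : Int) []) 1 0 = PySem.Int.floordiv y 2
        then (i : Int) else li) (-1) := by
    apply PySem.List.foldl_congr_mem
    intro acc i hi
    have hlt : i < lc.length := List.mem_range.mp hi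
    have hget : PySem.List.pyGetD (lc ++ [r]) (i : Int) [] = PySem.List.pyGetD lc (i : Int) [] := by
      simp [List.getD, List.getElem?_append_left hlt]
    rw [hget]
  rw [hcong]
  have hr : PySem.List.pyGetD (lc ++ [r]) ((lc.length : Nat) : Int) [] = r := by
    simp [List.getD]
  simp only [List.foldl_cons, List.foldl_nil, hr]

-- the dict lookup computes exactly A's last-wins scan
theorem pvBuild_getD (x y : Int) (lc : List (List Int)) :
    (pvBuild lc).getD (PySem.Int.floordiv x 2, PySem.Int.floordiv y 2) (-1) = pvAScan x y lc := by
  induction lc using List.reverseRecOn with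
  | nil => simp [pvBuild, pvAScan, PySem.List.enumerate]
  | append_singleton lc r ih =>
      rw [pvAScan_append]
      unfold pvBuild at *
      rw [PySem.List.enumerate_append, List.foldl_append]
      simp only [PySem.List.enumerate, List.foldl_cons, List.foldl_nil]
      rw [PySem.Dict.getD_insert]
      by_cases hm : PySem.List.pyGetD r 0 0 = PySem.Int.floordiv x 2 ∧
                    PySem.List.pyGetD r 1 0 = PySem.Int.floordiv y 2
      · have hk : (PySem.Int.floordiv x 2, PySem.Int.floordiv y 2) =
               (PySem.List.pyGetD r 0 0, PySem.List.pyGetD r 1 0) := by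
          rw [hm.1, hm.2]
        rw [if_pos hk, if_pos hm]
        simp
      · have : ¬ ((PySem.Int.floordiv x 2, PySem.Int.floordiv y 2) =
               (PySem.List.pyGetD r 0 0, PySem.List.pyGetD r 1 0)) := by
          intro h
          exact hm ⟨(Prod.mk.injEq _ _ _ _ ▸ h).1.symm, (Prod.mk.injEq _ _ _ _ ▸ h).2.symm⟩
        rw [if_neg this, if_neg hm, ih]

theorem pvAScan_cases (x y : Int) (lc : List (List Int)) :
    0 ≤ pvAScan x y lc ∨ pvAScan x y lc = -1 := by
  induction lc using List.reverseRecOn with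
  | nil => right; simp [pvAScan]
  | append_singleton lc r ih =>
      rw [pvAScan_append]
      split_ifs with h
      · left; positivity
      · exact ih

-- A's recursive call (first = False): second entry of the returned pair
theorem pvA_false_snd (x y : Int) (lc hc : List (List Int)) :
    (get_lowres_coords x y lc hc false).getD 1 0 =
      if x < 0 ∨ y < 0 then -1 else pvAScan x y lc := by
  unfold get_lowres_coords
  by_cases hx : x < 0 ∨ y < 0
  · simp [hx]
  · rw [if_neg hx, if_neg hx]
    simp only
    rcases pvAScan_cases x y lc with h | h
    · rw [if_pos h]; simp
    · rw [if_neg (by omega), h]; simp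

-- one candidate: A's guarded value against B's skip-or-test loop step
theorem pvCandStep (n : Prop) [Decidable n] (s : Int) (rest : List Int) :
    (if (if n then (-1 : Int) else s) ≥ 0 then [0, if n then (-1 : Int) else s] else rest)
    = if n then rest else if s ≥ 0 then [0, s] else rest := by
  split_ifs <;> first | rfl | omega

-- ===== VERDICT (by name: the statement is the Claim_ definition above) =====
theorem get_lowres_coords_spec : Claim_equal_get_lowres_coords := by
  intro x y lc hc first _ _
  unfold Spec_get_lowres_coords
  unfold get_lowres_coords get_lowres_coords_alt
  by_cases hx : x < 0 ∨ y < 0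
  · simp [hx]
  · rw [if_neg hx, if_neg hx]
    simp only [pvBuild_getD]
    by_cases hli : 0 ≤ pvAScan x y lc
    · rw [if_pos hli, if_pos hli]
    · rw [if_neg hli, if_neg hli]
      cases first with
      | false => simp
      | true =>
          simp only [pvTryCands, pvA_false_snd, pvBuild_getD]
          rw [pvCandStep, pvCandStep, pvCandStep]
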